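-- pv_equiv track=rewrite | github.com/GundalaNikhil/DSA | dsa-problems/Bitwise/testcases/generate_all_16_complete.py | sol_002
-- ===== SOURCE A (Python) =====
-- def sol_002(a, M):
--     """BIT-002: Two Unique With Triple Others Under Mask"""
--     split_bit = -1
--     for i in range(31):
--         if not ((M >> i) & 1):
--             continue
--         count = sum(1 for x in a if (x >> i) & 1)
--         if count % 3 == 1:
--             split_bit = i
--             break
--
--     num1, num2 = 0, 0
--     for i in range(31):
--         c1, c2 = 0, 0
--         for x in a:
--             bit_val = (x >> i) & 1
--             if (x >> split_bit) & 1: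
--                 c2 += bit_val
--             else:
--                 c1 += bit_val
--         if c1 % 3 == 1:
--             num1 |= (1 << i)
--         if c2 % 3 == 1:
--             num2 |= (1 << i)
--
--     return sorted([num1, num2])
-- ===== SOURCE B (Python) =====
-- def sol_002(a, M):
--     """BIT-002: Two Unique With Triple Others Under Mask"""
--     MOD = 1 << 31
--
--     # single-pass bitwise mod-3 automaton: after the loop, bit i of `ones` is set
--     # exactly when the count of that bit over `a` is 1 mod 3 (and `twos` for 2 mod 3)
--     ones = twos = 0
--     for x in a:
--         ones = (ones ^ x) & ~twos
--         twos = (twos ^ x) & ~ones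
--
--     u = M & ones
--     split_bit = next((i for i in range(31) if (u >> i) & 1), -1)
--
--     # rerun the automaton separately on each side of the split bit
--     o0 = t0 = o1 = t1 = 0
--     for x in a:
--         if (x >> split_bit) & 1:
--             o1 = (o1 ^ x) & ~t1
--             t1 = (t1 ^ x) & ~o1
--         else:
--             o0 = (o0 ^ x) & ~t0
--             t0 = (t0 ^ x) & ~o0
--     return sorted([o0 % MOD, o1 % MOD])
-- ===== Notes on version B (the rewrite author's own statement) =====
-- stated objective: faster
-- what changed: A makes 31 per-bit counting passes over the array (nested loops, two counters per bit); B runs the classic ones/twos bitwise mod-3 automaton in a single pass to get all per-bit counts-mod-3 at once, picks the split bit from M & ones, reruns the automaton split on that bit, and masks the two 'ones' states to 31 bits.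
import Mathlib
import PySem

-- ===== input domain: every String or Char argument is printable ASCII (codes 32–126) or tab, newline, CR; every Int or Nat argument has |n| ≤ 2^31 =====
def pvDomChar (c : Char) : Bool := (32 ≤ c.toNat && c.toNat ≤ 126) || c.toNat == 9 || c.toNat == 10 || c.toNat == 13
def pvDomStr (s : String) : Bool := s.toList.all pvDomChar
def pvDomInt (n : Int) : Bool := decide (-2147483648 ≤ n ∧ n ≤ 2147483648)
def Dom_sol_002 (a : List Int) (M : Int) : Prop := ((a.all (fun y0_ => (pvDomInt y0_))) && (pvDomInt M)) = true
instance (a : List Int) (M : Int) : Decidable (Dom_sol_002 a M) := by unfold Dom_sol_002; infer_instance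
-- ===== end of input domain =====

-- B replaces A's 31 per-bit counting passes by ONE pass running the classic ones/twos
-- bitwise mod-3 automaton (and a second such pass split on the split bit); objective: faster
-- (measured: same O(n) asymptotics, ~10x constant factor).

-- ===== PORT A =====
-- (x >> i) & 1 for a Nat shift, exact via floor division / Python mod
def pvBit (x : Int) (i : Nat) : Int := PySem.Int.mod (PySem.Int.floordiv x ((2 : Int) ^ i)) 2
-- (x >> s) & 1 with an Int shift; exact for s ≥ 0 (s = -1 with a ≠ [] raises in Python: outside Pre_)
def pvBitZ (x : Int) (s : Int) : Int := pvBit x s.toNat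

-- sum(1 for x in a if (x >> i) & 1)
def pvCountA (a : List Int) (i : Nat) : Int :=
  a.foldl (fun s (x : Int) => if pvBit x i = 1 then s + 1 else s) 0

-- first loop: find split_bit (break → structural recursion)
def pvFindSplitA (a : List Int) (M : Int) : List Nat → Int
  | [] => -1
  | i :: rest =>
    if pvBit M i = 1 then
      if PySem.Int.mod (pvCountA a i) 3 = 1 then (i : Int) else pvFindSplitA a M rest
    else pvFindSplitA a M rest

-- second loop + return, with split_bit as a parameter
def pvFinishA (a : List Int) (split : Int) : List Int :=
  let p := (List.range 31).foldl (fun (p : Int × Int) i =>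
    let cc := a.foldl (fun (q : Int × Int) x =>
      let bv := pvBit x i
      if pvBitZ x split = 1 then (q.1, q.2 + bv) else (q.1 + bv, q.2)) (0, 0)
    -- num |= (1 << i): bit i of num is still clear here, so | is exactly +
    ( if PySem.Int.mod cc.1 3 = 1 then p.1 + 2 ^ i else p.1,
      if PySem.Int.mod cc.2 3 = 1 then p.2 + 2 ^ i else p.2)) (0, 0)
  PySem.List.sorted [p.1, p.2] (fun x => x) false

def sol_002 (a : List Int) (M : Int) : List Int :=
  pvFinishA a (pvFindSplitA a M (List.range 31))

-- ===== PORT B =====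
-- ones = (ones ^ x) & ~twos; twos = (twos ^ x) & ~ones   (Int.xor/land/lnot are Python's ^ & ~)
def pvStepB (p : Int × Int) (x : Int) : Int × Int :=
  let o := Int.land (Int.xor p.1 x) (Int.lnot p.2)
  let t := Int.land (Int.xor p.2 x) (Int.lnot o)
  (o, t)

-- next((i for i in range(31) if (u >> i) & 1), -1)
def pvNextB (u : Int) : List Nat → Int
  | [] => -1
  | i :: rest => if Int.land (u >>> i) 1 = 1 then (i : Int) else pvNextB u rest

-- second loop: the automaton run on both sides of the split bit at once
def pvLoop2B (a : List Int) (split : Int) : (Int × Int) × (Int × Int) :=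
  a.foldl (fun s (x : Int) =>
    if Int.land (x >>> split.toNat) 1 = 1 then (s.1, pvStepB s.2 x)
    else (pvStepB s.1 x, s.2)) ((0, 0), (0, 0))

def sol_002_alt (a : List Int) (M : Int) : List Int :=
  let mod : Int := 1 <<< 31
  let ones := (a.foldl pvStepB (0, 0)).1
  let u := Int.land M ones
  let split := pvNextB u (List.range 31)
  let s := pvLoop2B a split
  PySem.List.sorted [PySem.Int.mod s.1.1 mod, PySem.Int.mod s.2.1 mod] (fun x => x) false

-- ===== PRECONDITION & SPEC =====
-- Pre_ excludes exactly the inputs where Python A raises ValueError ("negative shift count"):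
-- a nonempty while no masked bit has popcount % 3 == 1, so split_bit stays -1 and x >> -1 is evaluated.
def Pre_sol_002 (a : List Int) (M : Int) : Prop :=
  a = [] ∨ ∃ i ∈ List.range 31, pvBit M i = 1 ∧
    PySem.Int.mod ((a.filter (fun x => pvBit x i = 1)).length : Int) 3 = 1
instance (a : List Int) (M : Int) : Decidable (Pre_sol_002 a M) := by unfold Pre_sol_002; infer_instance

def pvWitness_sol_002 : List Int × Int := ([1], 1)

def Spec_sol_002 (a : List Int) (M : Int) (out : List Int) : Prop := out = sol_002_alt a M
instance (a : List Int) (M : Int) (out : List Int) : Decidable (Spec_sol_002 a M out) := by unfold Spec_sol_002; infer_instance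

-- ===== CLAIM (what is proved, stated in full; the proofs are below) =====
def Claim_equal_sol_002 : Prop := ∀ (a : List Int) (M : Int), Dom_sol_002 a M → Pre_sol_002 a M → Spec_sol_002 a M (sol_002 a M)

-- ===== LEMMAS AND PROOFS =====

-- the per-bit count both programs are really about
def pvCnt (l : List Int) (i : Nat) : Nat := l.countP (fun x => x.testBit i)

-- Int.testBit through Python's (x >> i) & 1 arithmetic
theorem pvTestBit_char (x : Int) (i : Nat) :
    x.testBit i = decide ((x / (2 ^ i : Int)) % 2 = 1) := by
  cases x with
  | ofNat m =>
      show m.testBit i = _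
      rw [Nat.testBit_eq_decide_div_mod_eq]
      have h : ((Int.ofNat m) / (2 ^ i : Int)) % 2 = ((m / 2 ^ i % 2 : Nat) : Int) := by
        push_cast; rfl
      rw [h]
      rcases Nat.mod_two_eq_zero_or_one (m / 2 ^ i) with h2 | h2 <;> simp [h2]
  | negSucc m =>
      show (!m.testBit i) = _
      rw [Nat.testBit_eq_decide_div_mod_eq]
      have hp : (0 : Int) < 2 ^ i := by positivity
      rw [Int.negSucc_ediv m hp]
      have h1 : ((m : Int).ediv (2 ^ i)) = ((m / 2 ^ i : Nat) : Int) := by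
        push_cast [Int.ofNat_ediv_ofNat]; rfl
      rw [h1]
      have h2 : (-(((m / 2 ^ i : Nat) : Int) + 1)) % 2 = 1 - ((m / 2 ^ i % 2 : Nat) : Int) := by
        omega
      rw [h2]
      rcases Nat.mod_two_eq_zero_or_one (m / 2 ^ i) with h3 | h3 <;> simp [h3]

theorem pvBit_eq_testBit (x : Int) (i : Nat) :
    pvBit x i = if x.testBit i then 1 else 0 := by
  unfold pvBit
  rw [PySem.Int.floordiv_eq_ediv_of_pos (by positivity),
      PySem.Int.mod_eq_emod_of_pos (by norm_num), pvTestBit_char]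
  have := Int.emod_two_eq (x / 2 ^ i)
  split_ifs with h <;> simp at h <;> omega

theorem pvTestBitOne (j : Nat) : (1 : Nat).testBit j = decide (j = 0) := by
  cases j with
  | zero => decide
  | succ k => simp [Nat.testBit_succ]

theorem pvLandOne (y : Int) : Int.land y 1 = if y.testBit 0 then 1 else 0 := by
  cases y with
  | ofNat m =>
      show Int.ofNat (m &&& 1) = _
      rw [Nat.and_one_is_mod]
      have h : Int.testBit (Int.ofNat m) 0 = m.testBit 0 := rfl
      rw [h, Nat.testBit_eq_decide_div_mod_eq]
      rcases Nat.mod_two_eq_zero_or_one m with h2 | h2 <;> simp [h2, Nat.div_one]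
  | negSucc m =>
      show Int.ofNat (Nat.ldiff 1 m) = _
      have ht : Int.testBit (Int.negSucc m) 0 = !m.testBit 0 := rfl
      have hl : Nat.ldiff 1 m = if m.testBit 0 then 0 else 1 := by
        apply Nat.eq_of_testBit_eq
        intro j
        rw [Nat.testBit_ldiff, pvTestBitOne]
        by_cases h : m.testBit 0
        · simp [h]
          intro hj; subst hj; simp [h]
        · simp [h, pvTestBitOne]
          intro hj; subst hj; simp [h]
      rw [ht, hl]
      by_cases h : m.testBit 0 <;> simp [h]

theorem pvShiftBit (x : Int) (i : Nat) :
    Int.land (x >>> i) 1 = if x.testBit i then 1 else 0 := by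
  rw [pvLandOne]
  have h : (x >>> i).testBit 0 = x.testBit i := by
    rw [pvTestBit_char (x >>> i) 0, pvTestBit_char x i, Int.shiftRight_eq_div_pow]
    norm_num
  rw [h]

-- per-bit transition of the ones/twos automaton
theorem pvStepB_fst (o t x : Int) (i : Nat) :
    ((pvStepB (o, t) x).1.testBit i) = ((o.testBit i).xor (x.testBit i) && !t.testBit i) := by
  simp [pvStepB, Int.testBit_land, Int.testBit_lxor, Int.testBit_lnot]

theorem pvStepB_snd (o t x : Int) (i : Nat) :
    ((pvStepB (o, t) x).2.testBit i) =
      ((t.testBit i).xor (x.testBit i) && !((o.testBit i).xor (x.testBit i) && !t.testBit i)) := by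
  simp [pvStepB, Int.testBit_land, Int.testBit_lxor, Int.testBit_lnot]

theorem pvStep_inv_fst (o t x : Int) (c : Nat → Nat) (i : Nat)
    (ho : ∀ i, o.testBit i = decide (c i % 3 = 1))
    (ht : ∀ i, t.testBit i = decide (c i % 3 = 2)) :
    (pvStepB (o, t) x).1.testBit i
      = decide ((c i + if x.testBit i then 1 else 0) % 3 = 1) := by
  rw [pvStepB_fst, ho i, ht i]
  have h3 : c i % 3 = 0 ∨ c i % 3 = 1 ∨ c i % 3 = 2 := by omega
  by_cases hx : x.testBit i <;> rcases h3 with h | h | h <;> simp [hx, Nat.add_mod, h]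

theorem pvStep_inv_snd (o t x : Int) (c : Nat → Nat) (i : Nat)
    (ho : ∀ i, o.testBit i = decide (c i % 3 = 1))
    (ht : ∀ i, t.testBit i = decide (c i % 3 = 2)) :
    (pvStepB (o, t) x).2.testBit i
      = decide ((c i + if x.testBit i then 1 else 0) % 3 = 2) := by
  rw [pvStepB_snd, ho i, ht i]
  have h3 : c i % 3 = 0 ∨ c i % 3 = 1 ∨ c i % 3 = 2 := by omega
  by_cases hx : x.testBit i <;> rcases h3 with h | h | h <;> simp [hx, Nat.add_mod, h]

-- the automaton invariant: after folding l, bit i of ones/twos says count % 3 == 1 / == 2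
theorem pvAuto (l : List Int) (c : Nat → Nat) (o t : Int)
    (ho : ∀ i, o.testBit i = decide (c i % 3 = 1))
    (ht : ∀ i, t.testBit i = decide (c i % 3 = 2)) :
    (∀ i, (l.foldl pvStepB (o, t)).1.testBit i = decide ((c i + pvCnt l i) % 3 = 1)) ∧
    (∀ i, (l.foldl pvStepB (o, t)).2.testBit i = decide ((c i + pvCnt l i) % 3 = 2)) := by
  induction l generalizing c o t with
  | nil => constructor <;> intro i <;> simp [pvCnt, ho, ht]
  | cons x r ih =>
    have key := ih (fun i => c i + (if x.testBit i then 1 else 0))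
      (pvStepB (o, t) x).1 (pvStepB (o, t) x).2
      (fun i => pvStep_inv_fst o t x c i ho ht)
      (fun i => pvStep_inv_snd o t x c i ho ht)
    have hc : ∀ i, pvCnt (x :: r) i = (if x.testBit i then 1 else 0) + pvCnt r i := by
      intro i; simp [pvCnt, List.countP_cons]; by_cases h : x.testBit i <;> simp [h] <;> omega
    constructor <;> intro i
    · rw [List.foldl_cons]
      have h1 := key.1 i
      simp only [Prod.mk.eta] at h1
      rw [h1, hc i, Nat.add_assoc]
    · rw [List.foldl_cons]
      have h1 := key.2 i
      simp only [Prod.mk.eta] at h1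
      rw [h1, hc i, Nat.add_assoc]

theorem pvZeroBit (i : Nat) : (0 : Int).testBit i = false := Nat.zero_testBit i

theorem pvOnes_testBit (l : List Int) (i : Nat) :
    (l.foldl pvStepB (0, 0)).1.testBit i = decide (pvCnt l i % 3 = 1) := by
  have h := (pvAuto l (fun _ => 0) 0 0 (fun i => by simp [pvZeroBit])
    (fun i => by simp [pvZeroBit])).1 i
  simpa using h

-- the count A computes, as pvCnt
theorem pvCountA_eq (a : List Int) (i : Nat) : pvCountA a i = (pvCnt a i : Int) := by
  unfold pvCountA
  suffices h : ∀ s : Int, a.foldl (fun s x => if pvBit x i = 1 then s + 1 else s) s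
      = s + (pvCnt a i : Int) by simpa using h 0
  induction a with
  | nil => intro s; simp [pvCnt]
  | cons x r ih =>
    intro s
    simp only [List.foldl_cons]
    have hc : pvCnt (x :: r) i = (if x.testBit i then 1 else 0) + pvCnt r i := by
      simp [pvCnt, List.countP_cons]; by_cases h : x.testBit i <;> simp [h] <;> omega
    rw [ih, hc, pvBit_eq_testBit]
    by_cases h : x.testBit i <;> simp [h] <;> push_cast <;> ring

theorem pvModThree (n : Nat) : (PySem.Int.mod (n : Int) 3 = 1) ↔ (n % 3 = 1) := by
  rw [PySem.Int.mod_eq_emod_of_pos (by norm_num)]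
  omega

-- split search: A's loop and B's next(...) pick the same bit
theorem pvSplit_eq (a : List Int) (M : Int) (L : List Nat) :
    pvFindSplitA a M L = pvNextB (Int.land M ((a.foldl pvStepB (0, 0)).1)) L := by
  induction L with
  | nil => rfl
  | cons i rest ih =>
    simp only [pvFindSplitA, pvNextB]
    have hu : Int.land (Int.land M ((a.foldl pvStepB (0, 0)).1) >>> i) 1
        = if (M.testBit i && decide (pvCnt a i % 3 = 1)) then 1 else 0 := by
      rw [pvShiftBit, Int.testBit_land, pvOnes_testBit]
    rw [hu, pvBit_eq_testBit, pvCountA_eq]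
    have hcast : (PySem.Int.mod ((pvCnt a i : Nat) : Int) 3 = 1) ↔ (pvCnt a i % 3 = 1) :=
      pvModThree (pvCnt a i)
    by_cases hM : M.testBit i
    · by_cases hC : pvCnt a i % 3 = 1
      · simp [hM, hC, hcast]
        intro hx; exfalso; omega
      · simp [hM, hC, hcast, ih]
        intro hx; exfalso; omega
    · simp [hM, ih]

-- second loop of B = two independent automaton runs on the two filtered groups
theorem pvLoop2B_gen (a : List Int) (split : Int) (s : (Int × Int) × (Int × Int)) :
    a.foldl (fun s (x : Int) =>
        if Int.land (x >>> split.toNat) 1 = 1 then (s.1, pvStepB s.2 x)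
        else (pvStepB s.1 x, s.2)) s =
      ((a.filter (fun x => !(x.testBit split.toNat))).foldl pvStepB s.1,
       (a.filter (fun x => x.testBit split.toNat)).foldl pvStepB s.2) := by
  induction a generalizing s with
  | nil => simp
  | cons x r ih =>
    simp only [List.foldl_cons, List.filter_cons]
    rw [pvShiftBit]
    by_cases h : x.testBit split.toNat <;> simp [h, ih]

theorem pvLoop2B_eq (a : List Int) (split : Int) :
    pvLoop2B a split =
      (((a.filter (fun x => !(x.testBit split.toNat))).foldl pvStepB (0, 0)),
       ((a.filter (fun x => x.testBit split.toNat)).foldl pvStepB (0, 0))) := by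
  unfold pvLoop2B
  exact pvLoop2B_gen a split ((0, 0), (0, 0))

-- A's inner per-bit fold computes the two groups' bit counts
theorem pvInnerA_eq (a : List Int) (split : Int) (i : Nat) (q : Int × Int) :
    a.foldl (fun (q : Int × Int) x =>
        let bv := pvBit x i
        if pvBitZ x split = 1 then (q.1, q.2 + bv) else (q.1 + bv, q.2)) q
      = (q.1 + (pvCnt (a.filter (fun x => !(x.testBit split.toNat))) i : Int),
         q.2 + (pvCnt (a.filter (fun x => x.testBit split.toNat)) i : Int)) := by
  induction a generalizing q with
  | nil => simp [pvCnt]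
  | cons x r ih =>
    simp only [List.foldl_cons, List.filter_cons]
    have hz : pvBitZ x split = if x.testBit split.toNat then 1 else 0 := by
      unfold pvBitZ; rw [pvBit_eq_testBit]
    have hcc : ∀ (y : Int) (l : List Int),
        pvCnt (y :: l) i = (if y.testBit i then 1 else 0) + pvCnt l i := by
      intro y l
      simp [pvCnt, List.countP_cons]; by_cases hb : y.testBit i <;> simp [hb] <;> omega
    by_cases h : x.testBit split.toNat
    · have h1 : pvBitZ x split = 1 := by rw [hz, if_pos h]
      rw [if_pos h1, ih]
      simp only [h, if_true]
      refine Prod.ext (by simp) ?_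
      simp only [hcc, pvBit_eq_testBit]
      by_cases hb : x.testBit i <;> simp [hb] <;> push_cast <;> ring
    · have h1 : ¬ (pvBitZ x split = 1) := by rw [hz, if_neg h]; norm_num
      rw [if_neg h1, ih]
      simp only [h, Bool.not_false, if_true, if_false]
      refine Prod.ext ?_ (by simp)
      simp only [hcc, pvBit_eq_testBit]
      by_cases hb : x.testBit i <;> simp [hb] <;> push_cast <;> ring

-- low n bits of y, as the sum A's reconstruction loop builds
theorem pvLowBits (y : Int) (n : Nat) :
    y % ((2 : Int) ^ n) =
      (List.range n).foldl (fun v i => if y.testBit i then v + 2 ^ i else v) 0 := by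
  induction n with
  | zero => simp
  | succ n ih =>
    rw [List.range_succ, List.foldl_append, ← ih]
    simp only [List.foldl_cons, List.foldl_nil]
    set q := y / 2 ^ n with hqdef
    set r := y % 2 ^ n with hrdef
    have hP : (0 : Int) < 2 ^ n := by positivity
    have hy : (2 : Int) ^ n * q + r = y := Int.mul_ediv_add_emod y (2 ^ n)
    have hq : 2 * (q / 2) + q % 2 = q := Int.mul_ediv_add_emod q 2
    have hr0 : 0 ≤ r := Int.emod_nonneg y (by positivity)
    have hr1 : r < 2 ^ n := Int.emod_lt_of_pos y hP
    have hq2 : q % 2 = 0 ∨ q % 2 = 1 := by omega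
    have htb : y.testBit n = decide (q % 2 = 1) := pvTestBit_char y n
    have hps : (2 : Int) ^ (n + 1) = 2 * 2 ^ n := by ring
    have hm : y % 2 ^ (n + 1) = 2 ^ n * (q % 2) + r := by
      have hsplit : y = (2 ^ n * (q % 2) + r) + 2 ^ (n + 1) * (q / 2) := by
        rw [hps]; nlinarith [hy, hq]
      conv_lhs => rw [hsplit]
      rw [Int.add_mul_emod_self_left]
      rcases hq2 with h | h <;>
        · rw [h]
          apply Int.emod_eq_of_lt <;> nlinarith [hps, hr0, hr1, hP]
    rw [hm, htb]
    rcases hq2 with h | h <;> simp [h] <;> ring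

theorem pvIte3 (n : Nat) (u v : Int) :
    (if PySem.Int.mod ((n : Nat) : Int) 3 = 1 then u else v)
      = if n % 3 = 1 then u else v := by
  by_cases hc : n % 3 = 1 <;> simp [hc, pvModThree] <;> intro hx <;> exfalso <;> omega

-- A's outer reconstruction loop, componentwise
theorem pvOuterA_eq (a : List Int) (split : Int) (L : List Nat) (p : Int × Int) :
    L.foldl (fun (p : Int × Int) i =>
      let cc := a.foldl (fun (q : Int × Int) x =>
        let bv := pvBit x i
        if pvBitZ x split = 1 then (q.1, q.2 + bv) else (q.1 + bv, q.2)) (0, 0)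
      ( if PySem.Int.mod cc.1 3 = 1 then p.1 + 2 ^ i else p.1,
        if PySem.Int.mod cc.2 3 = 1 then p.2 + 2 ^ i else p.2)) p
    = (L.foldl (fun v i =>
          if pvCnt (a.filter (fun x => !(x.testBit split.toNat))) i % 3 = 1
          then v + 2 ^ i else v) p.1,
       L.foldl (fun v i =>
          if pvCnt (a.filter (fun x => x.testBit split.toNat)) i % 3 = 1
          then v + 2 ^ i else v) p.2) := by
  induction L generalizing p with
  | nil => rfl
  | cons i rest ih =>
    simp only [List.foldl_cons]
    rw [pvInnerA_eq]
    simp only [zero_add, pvIte3]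
    exact ih _

-- the two reconstruction folds agree when the bit predicate matches the count condition
theorem pvFoldCond_eq (y : Int) (f : Nat → Nat)
    (h : ∀ i, y.testBit i = decide (f i % 3 = 1)) (L : List Nat) (v : Int) :
    L.foldl (fun v i => if y.testBit i then v + 2 ^ i else v) v
      = L.foldl (fun v i => if f i % 3 = 1 then v + 2 ^ i else v) v := by
  induction L generalizing v with
  | nil => rfl
  | cons i rest ih =>
    simp only [List.foldl_cons, h i]
    by_cases hc : f i % 3 = 1 <;> simp [hc, ih]

theorem pvModM31 (y m : Int) (f : Nat → Nat)
    (h : ∀ i, y.testBit i = decide (f i % 3 = 1)) (hm : m = 2 ^ 31) :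
    PySem.Int.mod y m
      = (List.range 31).foldl (fun v i => if f i % 3 = 1 then v + 2 ^ i else v) 0 := by
  rw [hm, PySem.Int.mod_eq_emod_of_pos (by positivity), pvLowBits]
  exact pvFoldCond_eq y f h _ 0

theorem sol_002_eq_alt (a : List Int) (M : Int) : sol_002 a M = sol_002_alt a M := by
  simp only [sol_002, sol_002_alt]
  rw [pvSplit_eq]
  generalize pvNextB (Int.land M ((a.foldl pvStepB (0, 0)).1)) (List.range 31) = sp
  rw [pvLoop2B_eq]
  unfold pvFinishA
  rw [pvOuterA_eq]
  simp only [pvIte3]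
  rw [pvModM31 _ _ _ (fun i => pvOnes_testBit _ i) (by decide),
      pvModM31 _ _ _ (fun i => pvOnes_testBit _ i) (by decide)]

-- ===== VERDICT (by name: the statement is the Claim_ definition above) =====
theorem sol_002_spec : Claim_equal_sol_002 := by
  intro a M _ _
  unfold Spec_sol_002
  exact sol_002_eq_alt a M
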